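-- pv_equiv track=rewrite | github.com/cotr46/pdf-wrapper-worker-service-v2 | pdf_processor.py | get_best_simple_result
-- ===== SOURCE A (Python) =====
-- from typing import List, Dict, Optional
--
-- def get_best_simple_result(data_list: List[Dict]) -> Dict:
--     """
--     Untuk dokumen simple (SKU, NPWP, KTP, NIB), pilih hasil terbaik
--     """
--     if not data_list:
--         return {}
--
--     # Prioritas: Good > Recheck by Supervisor > Bad
--     good_results = [d for d in data_list if d.get("status_kepatuhan_format") == "Good"]
--     if good_results:
--         return good_results[0]
--
--     recheck_results = [d for d in data_list if d.get("status_kepatuhan_format") == "Recheck by Supervisor"]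
--     if recheck_results:
--         return recheck_results[0]
--
--     # Fallback: ambil yang paling lengkap (paling banyak field yang tidak null)
--     def count_filled_fields(data):
--         count = 0
--         for key, value in data.items():
--             if value is not None and value != "":
--                 count += 1
--         return count
--
--     return max(data_list, key=count_filled_fields)
-- ===== SOURCE B (Python) =====
-- def get_best_simple_result(data_list):
--     first_good = None
--     first_recheck = None
--     best = None
--     best_count = -1
--     for d in data_list:
--         status = d.get("status_kepatuhan_format")
--         if status == "Good":
--             if first_good is None:
--                 first_good = d
--         elif status == "Recheck by Supervisor":
--             if first_recheck is None:
--                 first_recheck = d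
--         c = sum(1 for v in d.values() if v is not None and v != "")
--         if c > best_count:
--             best = d
--             best_count = c
--     if first_good is not None:
--         return first_good
--     if first_recheck is not None:
--         return first_recheck
--     return best if best is not None else {}
-- ===== Notes on version B (the rewrite author's own statement) =====
-- stated objective: alternative
-- what changed: Replaced A's three separate passes (filter Good, filter Recheck, max by filled-count) with a single pass maintaining first_good, first_recheck and a running best/best_count accumulator with strict-> updates.
import Mathlib
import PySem

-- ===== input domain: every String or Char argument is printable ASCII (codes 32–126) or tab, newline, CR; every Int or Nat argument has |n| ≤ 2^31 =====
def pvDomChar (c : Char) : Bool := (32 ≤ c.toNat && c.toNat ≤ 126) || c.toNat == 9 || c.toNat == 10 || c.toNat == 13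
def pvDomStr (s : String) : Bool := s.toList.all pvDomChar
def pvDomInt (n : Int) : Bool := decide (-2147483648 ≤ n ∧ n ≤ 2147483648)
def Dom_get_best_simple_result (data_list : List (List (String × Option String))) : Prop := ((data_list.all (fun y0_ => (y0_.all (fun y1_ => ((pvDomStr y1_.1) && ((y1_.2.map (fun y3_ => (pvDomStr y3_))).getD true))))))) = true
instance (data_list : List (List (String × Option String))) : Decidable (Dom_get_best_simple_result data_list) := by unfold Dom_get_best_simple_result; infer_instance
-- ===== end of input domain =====

-- B replaces A's three filter/max passes by a single pass tracking first Good, first Recheck and the running fullest dict (alternative decomposition, same cost).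


-- ===== PORT A =====
-- d.get("status_kepatuhan_format") on the association list (first match, none = key absent)
def aStatusGet (d : List (String × Option String)) : Option (Option String) :=
  (d.find? (fun kv => kv.1 == "status_kepatuhan_format")).map Prod.snd

-- the inner helper count_filled_fields: explicit counting loop over d.items()
def count_filled_fields (d : List (String × Option String)) : Int :=
  d.foldl (fun count kv => if kv.2 != none && kv.2 != some "" then count + 1 else count) 0

def get_best_simple_result (data_list : List (List (String × Option String))) : List (String × Option String) :=
  match data_list with
  | [] => []
  | _ :: _ =>
    let good_results := data_list.filter (fun d => aStatusGet d == some (some "Good"))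
    match good_results with
    | g :: _ => g
    | [] =>
      let recheck_results := data_list.filter (fun d => aStatusGet d == some (some "Recheck by Supervisor"))
      match recheck_results with
      | r :: _ => r
      | [] => (PySem.List.max? data_list count_filled_fields).getD []

-- ===== PORT B =====
-- v is not None and v != ""
def bFilled (v : Option String) : Bool :=
  match v with
  | some s => s != ""
  | none => false

-- sum(1 for v in d.values() if v is not None and v != "")
def bCount (d : List (String × Option String)) : Int :=
  (((d.map Prod.snd).countP bFilled : Nat) : Int)

-- loop body of B: state = (first_good, first_recheck, best, best_count)
def bStep
    (st : Option (List (String × Option String)) × Option (List (String × Option String)) ×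
          Option (List (String × Option String)) × Int)
    (d : List (String × Option String)) :
    Option (List (String × Option String)) × Option (List (String × Option String)) ×
    Option (List (String × Option String)) × Int :=
  let (g, r, b, bc) := st
  let status := (d.find? (fun kv => kv.1 == "status_kepatuhan_format")).map Prod.snd
  let gr : Option (List (String × Option String)) × Option (List (String × Option String)) :=
    if status == some (some "Good") then
      (if g.isNone then (some d, r) else (g, r))
    else if status == some (some "Recheck by Supervisor") then
      (if r.isNone then (g, some d) else (g, r))
    else (g, r)
  let c := bCount d
  if c > bc then (gr.1, gr.2, some d, c) else (gr.1, gr.2, b, bc)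

def get_best_simple_result_alt (data_list : List (List (String × Option String))) : List (String × Option String) :=
  match data_list.foldl bStep (none, none, none, -1) with
  | (some g, _, _, _) => g
  | (none, some r, _, _) => r
  | (none, none, b, _) => b.getD []

-- ===== PRECONDITION & SPEC =====
def Spec_get_best_simple_result (data_list : List (List (String × Option String))) (out : List (String × Option String)) : Prop := out = get_best_simple_result_alt data_list
instance (data_list : List (List (String × Option String))) (out : List (String × Option String)) : Decidable (Spec_get_best_simple_result data_list out) := by unfold Spec_get_best_simple_result; infer_instance

-- ===== CLAIM (what is proved, stated in full; the proofs are below) =====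
def Claim_equal_get_best_simple_result : Prop := ∀ (data_list : List (List (String × Option String))), Dom_get_best_simple_result data_list → Spec_get_best_simple_result data_list (get_best_simple_result data_list)

-- ===== LEMMAS AND PROOFS =====

-- the two status predicates A filters with
def pG (d : List (String × Option String)) : Bool := aStatusGet d == some (some "Good")
def pR (d : List (String × Option String)) : Bool := aStatusGet d == some (some "Recheck by Supervisor")

-- the step of PySem.List.max? with key bCount
def mStep (acc : Option (List (String × Option String))) (x : List (String × Option String)) :
    Option (List (String × Option String)) :=
  match acc with
  | none => some x
  | some m => if bCount m < bCount x then some x else some m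

lemma pG_pR_exclusive (d : List (String × Option String)) : pR d = true → pG d = false := by
  simp only [pG, pR, beq_iff_eq]
  intro h
  rw [h]
  decide

lemma bCount_nonneg (d : List (String × Option String)) : 0 ≤ bCount d := by
  simp [bCount]

lemma count_eq (d : List (String × Option String)) : count_filled_fields d = bCount d := by
  rw [count_filled_fields, PySem.List.foldl_count_if, bCount, List.countP_map]
  simp only [zero_add, Nat.cast_inj]
  apply List.countP_congr
  intro kv _
  cases h : kv.2 with
  | none => simp [bFilled, Function.comp, h]
  | some s => simp [bFilled, Function.comp, h]

-- absorbing one first-occurrence step into Option.or of find?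
lemma or_step {α : Type} (p : α → Bool) (d : α) (t : List α) (o : Option α) :
    (if p d then (if o.isNone then some d else o) else o).or (t.find? p) =
      o.or ((d :: t).find? p) := by
  cases o <;> by_cases h : p d <;> simp [List.find?_cons, h, Option.or]

-- the single-pass fold computes: first Good, first (Recheck and not Good), and max?'s running best
lemma fold_eq (xs : List (List (String × Option String))) :
    ∀ (g r b : Option (List (String × Option String))) (bc : Int),
    ((b = none ∧ bc = -1) ∨ (∃ m, b = some m ∧ bc = bCount m)) →
    ∃ bc', xs.foldl bStep (g, r, b, bc) =
      (g.or (xs.find? pG), r.or (xs.find? (fun d => !pG d && pR d)), xs.foldl mStep b, bc') ∧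
      ((xs.foldl mStep b = none ∧ bc' = -1) ∨
        (∃ m, xs.foldl mStep b = some m ∧ bc' = bCount m)) := by
  induction xs with
  | nil =>
    intro g r b bc hinv
    exact ⟨bc, by simp, hinv⟩
  | cons d t ih =>
    intro g r b bc hinv
    have hstep : bStep (g, r, b, bc) d =
        ((if pG d then (if g.isNone then some d else g) else g),
         (if !pG d && pR d then (if r.isNone then some d else r) else r),
         (if bCount d > bc then some d else b),
         (if bCount d > bc then bCount d else bc)) := by
      simp only [bStep, pG, pR, aStatusGet]
      by_cases h1 : ((d.find? (fun kv => kv.1 == "status_kepatuhan_format")).map Prod.snd == some (some "Good")) = true <;>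
        by_cases h2 : ((d.find? (fun kv => kv.1 == "status_kepatuhan_format")).map Prod.snd == some (some "Recheck by Supervisor")) = true <;>
          simp_all <;> split_ifs <;> simp_all
    have hb1 : (if bCount d > bc then some d else b) = mStep b d := by
      rcases hinv with ⟨hb0, hc0⟩ | ⟨m, hbm, hcm⟩
      · subst hb0; subst hc0
        have : bCount d > -1 := lt_of_lt_of_le (by norm_num) (bCount_nonneg d)
        simp [mStep, this]
      · subst hbm; subst hcm
        by_cases h : bCount d > bCount m
        · have h' : bCount m < bCount d := h
          simp [mStep, h]
        · have h' : ¬ bCount m < bCount d := h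
          simp [mStep, h]
    have hb2 : (mStep b d = none ∧ (if bCount d > bc then bCount d else bc) = -1) ∨
        (∃ m, mStep b d = some m ∧ (if bCount d > bc then bCount d else bc) = bCount m) := by
      rw [← hb1]
      rcases hinv with ⟨hb0, hc0⟩ | ⟨m, hbm, hcm⟩
      · subst hb0; subst hc0
        have : bCount d > -1 := lt_of_lt_of_le (by norm_num) (bCount_nonneg d)
        exact Or.inr ⟨d, by simp [this], by simp [this]⟩
      · subst hbm; subst hcm
        by_cases h : bCount d > bCount m
        · exact Or.inr ⟨d, by simp [h], by simp [h]⟩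
        · exact Or.inr ⟨m, by simp [h], by simp [h]⟩
    simp only [List.foldl_cons, hstep, hb1]
    obtain ⟨bc', heq, hinv'⟩ := ih _ _ _ _ hb2
    refine ⟨bc', ?_, hinv'⟩
    rw [heq, or_step]
    cases r <;> by_cases hpr : (!pG d && pR d) = true <;>
      simp [List.find?_cons, hpr, Option.or]

lemma find?_RnotG (xs : List (List (String × Option String))) :
    xs.find? (fun d => !pG d && pR d) = xs.find? pR := by
  induction xs with
  | nil => rfl
  | cons d t ih =>
    by_cases h : pR d = true
    · simp [h, pG_pR_exclusive d h]
    · simp only [Bool.not_eq_true] at h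
      simp [h, ih]

lemma max?_eq_foldl_mStep (xs : List (List (String × Option String))) :
    PySem.List.max? xs count_filled_fields = xs.foldl mStep none := by
  have hkey : count_filled_fields = bCount := funext count_eq
  rw [PySem.List.max?, hkey]
  congr 1
  funext acc x
  cases acc <;> rfl

-- ===== VERDICT (by name: the statement is the Claim_ definition above) =====
theorem get_best_simple_result_spec : Claim_equal_get_best_simple_result := by
  intro data_list _
  unfold Spec_get_best_simple_result
  cases hdl : data_list with
  | nil => simp [get_best_simple_result, get_best_simple_result_alt]
  | cons d t =>
    obtain ⟨bc', hfold, -⟩ := fold_eq (d :: t) none none none (-1) (Or.inl ⟨rfl, rfl⟩)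
    have halt : get_best_simple_result_alt (d :: t) =
        match ((d :: t).find? pG, (d :: t).find? (fun x => !pG x && pR x),
               (d :: t).foldl mStep none) with
        | (some g, _, _) => g
        | (none, some r, _) => r
        | (none, none, b) => b.getD [] := by
      rw [get_best_simple_result_alt, hfold]
      simp only [Option.none_or]
      cases List.find? pG (d :: t) <;> cases List.find? (fun x => !pG x && pR x) (d :: t) <;> rfl
    have hgfilt : (d :: t).filter (fun x => aStatusGet x == some (some "Good")) =
        (d :: t).filter pG := rfl
    have hrfilt : (d :: t).filter (fun x => aStatusGet x == some (some "Recheck by Supervisor")) =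
        (d :: t).filter pR := rfl
    rw [get_best_simple_result, halt]
    simp only [hgfilt, hrfilt, find?_RnotG]
    cases hG : (d :: t).find? pG with
    | some g =>
      have h1 : ((d :: t).filter pG).head? = some g := by rw [List.head?_filter]; exact hG
      cases hf : (d :: t).filter pG with
      | nil => rw [hf] at h1; simp at h1
      | cons a l => rw [hf] at h1; simp at h1; simp [h1]
    | none =>
      have hfe : (d :: t).filter pG = [] := by
        have h1 : ((d :: t).filter pG).head? = none := by rw [List.head?_filter]; exact hG
        cases hf : (d :: t).filter pG with
        | nil => rfl
        | cons a l => rw [hf] at h1; simp at h1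
      rw [hfe]
      cases hR : (d :: t).find? pR with
      | some r =>
        have h1 : ((d :: t).filter pR).head? = some r := by rw [List.head?_filter]; exact hR
        cases hf : (d :: t).filter pR with
        | nil => rw [hf] at h1; simp at h1
        | cons a l => rw [hf] at h1; simp at h1; simp [h1]
      | none =>
        have hre : (d :: t).filter pR = [] := by
          have h1 : ((d :: t).filter pR).head? = none := by rw [List.head?_filter]; exact hR
          cases hf : (d :: t).filter pR with
          | nil => rfl
          | cons a l => rw [hf] at h1; simp at h1
        rw [hre]
        simp [max?_eq_foldl_mStep]
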